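-- pv_equiv track=rewrite | github.com/camellia2077/Bills_Master_cpp | tools/flows/build_bills_tracer_cli.py | normalize_cmake_build_extra_args
-- ===== SOURCE A (Python) =====
-- def normalize_cmake_build_extra_args(extra_args: list[str] | None) -> list[str]:
--     if not extra_args:
--         return []
--
--     normalized = list(extra_args)
--     while len(normalized) > 1 and normalized[0] == "--" and normalized[1] == "--":
--         normalized.pop(0)
--     if normalized == ["--"]:
--         return []
--     return normalized
-- ===== SOURCE B (Python) =====
-- def normalize_cmake_build_extra_args(extra_args):
--     if not extra_args:
--         return []
--     i = 0
--     n = len(extra_args)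
--     while i < n and extra_args[i] == "--":
--         i += 1
--     tail = extra_args[i:]
--     if not tail:
--         return []
--     return ["--"] + tail if i > 0 else tail
-- ===== Notes on version B (the rewrite author's own statement) =====
-- stated objective: simpler
-- what changed: Instead of repeatedly popping the first element while the first two are both double-dash and then testing for a leftover lone double-dash, B counts the leading run of double-dash tokens in one index scan, slices the tail once, and prepends a single double-dash only when there was a run and the tail is non-empty.
import Mathlib
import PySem

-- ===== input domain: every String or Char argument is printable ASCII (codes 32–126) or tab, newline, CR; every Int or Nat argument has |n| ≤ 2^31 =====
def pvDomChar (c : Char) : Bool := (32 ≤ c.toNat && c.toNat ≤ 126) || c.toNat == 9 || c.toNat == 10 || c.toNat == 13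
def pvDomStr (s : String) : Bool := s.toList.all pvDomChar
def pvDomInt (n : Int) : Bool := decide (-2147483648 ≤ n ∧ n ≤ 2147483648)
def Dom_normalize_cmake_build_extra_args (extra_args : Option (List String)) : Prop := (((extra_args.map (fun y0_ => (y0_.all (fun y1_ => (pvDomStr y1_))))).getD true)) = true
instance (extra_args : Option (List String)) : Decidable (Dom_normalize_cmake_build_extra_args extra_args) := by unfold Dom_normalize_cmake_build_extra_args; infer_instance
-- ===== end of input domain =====

-- B strips the leading run of "--" with one index scan and a single slice, instead of A's
-- pop(0) loop and final lone-"--" comparison; the return values are equal on all inputs.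

-- ===== PORT A =====
-- the while loop: pop(0) while the first two elements are both "--"
def pvPopLoop : List String → List String
  | a :: b :: rest => if a = "--" ∧ b = "--" then pvPopLoop (b :: rest) else a :: b :: rest
  | xs => xs

def normalize_cmake_build_extra_args (extra_args : Option (List String)) : List String :=
  match extra_args with
  | none => []
  | some xs =>
    if xs = [] then []                 -- 'if not extra_args'
    else
      let normalized := pvPopLoop xs
      if normalized = ["--"] then [] else normalized

-- ===== PORT B =====
-- the index loop: i advances over the leading run of "--"
def pvCountLead : List String → Nat
  | [] => 0
  | x :: xs => if x = "--" then pvCountLead xs + 1 else 0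

def normalize_cmake_build_extra_args_alt (extra_args : Option (List String)) : List String :=
  match extra_args with
  | none => []
  | some xs =>
    if xs = [] then []
    else
      let i := pvCountLead xs
      let tail := xs.drop i            -- extra_args[i:]
      if tail = [] then []
      else if i > 0 then "--" :: tail else tail

-- ===== PRECONDITION & SPEC =====
def Spec_normalize_cmake_build_extra_args (extra_args : Option (List String)) (out : List String) : Prop := out = normalize_cmake_build_extra_args_alt extra_args
instance (extra_args : Option (List String)) (out : List String) : Decidable (Spec_normalize_cmake_build_extra_args extra_args out) := by unfold Spec_normalize_cmake_build_extra_args; infer_instance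

-- ===== CLAIM (what is proved, stated in full; the proofs are below) =====
def Claim_equal_normalize_cmake_build_extra_args : Prop := ∀ (extra_args : Option (List String)), Dom_normalize_cmake_build_extra_args extra_args → Spec_normalize_cmake_build_extra_args extra_args (normalize_cmake_build_extra_args extra_args)

-- ===== LEMMAS AND PROOFS =====

theorem pvPopLoop_dash (t : List String) :
    pvPopLoop ("--" :: t) = "--" :: t.drop (pvCountLead t) := by
  induction t with
  | nil => simp [pvPopLoop, pvCountLead]
  | cons y r ih =>
    by_cases hy : y = "--"
    · subst hy
      simpa [pvPopLoop, pvCountLead] using ih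
    · simp [pvPopLoop, pvCountLead, hy]

theorem pvPopLoop_nondash (x : String) (t : List String) (hx : x ≠ "--") :
    pvPopLoop (x :: t) = x :: t := by
  cases t with
  | nil => simp [pvPopLoop]
  | cons b r => simp [pvPopLoop, hx]

-- ===== VERDICT (by name: the statement is the Claim_ definition above) =====
theorem normalize_cmake_build_extra_args_spec : Claim_equal_normalize_cmake_build_extra_args := by
  intro extra_args _
  unfold Spec_normalize_cmake_build_extra_args
  cases extra_args with
  | none => rfl
  | some xs =>
    cases xs with
    | nil => rfl
    | cons x t =>
      by_cases hx : x = "--"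
      · subst hx
        simp only [normalize_cmake_build_extra_args, normalize_cmake_build_extra_args_alt,
          pvPopLoop_dash, pvCountLead]
        by_cases ht : t.drop (pvCountLead t) = []
        · simp [ht]
        · simp [ht, List.drop_succ_cons]
      · simp [normalize_cmake_build_extra_args, normalize_cmake_build_extra_args_alt,
          pvPopLoop_nondash x t hx, pvCountLead, hx]
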